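-- pv_equiv track=rewrite | github.com/fresh-fx59/iron-lady-assistant | src/memory.py | _format_facts_by_type
-- ===== SOURCE A (Python) =====
-- _FACT_TYPE_PRIORITY = {
--     "workflow": 0,
--     "operation": 1,
--     "project": 2,
--     "infrastructure": 3,
--     "communication": 4,
--     "preference": 5,
--     "identity": 6,
--     "tooling": 7,
--     "schedule": 8,
--     "misc": 9,
-- }
--
-- def _format_facts_by_type(facts: list[dict]) -> list[str]:
--     buckets: dict[str, list[str]] = {}
--     for fact in facts:
--         fact_type = str(fact.get("type", "misc"))
--         key = fact.get("key", "?")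
--         value = fact.get("value", "?")
--         buckets.setdefault(fact_type, []).append(f"- {key}: {value}")
--
--     lines: list[str] = []
--     for fact_type in sorted(buckets, key=lambda item: _FACT_TYPE_PRIORITY.get(item, 99)):
--         lines.append(f"[{fact_type}]")
--         lines.extend(buckets[fact_type])
--     return lines
-- ===== SOURCE B (Python) =====
-- _FACT_TYPE_PRIORITY = {
--     "workflow": 0,
--     "operation": 1,
--     "project": 2,
--     "infrastructure": 3,
--     "communication": 4,
--     "preference": 5,
--     "identity": 6,
--     "tooling": 7,
--     "schedule": 8,
--     "misc": 9,
-- }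
--
-- def _format_facts_by_type(facts: list[dict]) -> list[str]:
--     def ftype(fact):
--         return str(fact.get("type", "misc"))
--
--     types = sorted(dict.fromkeys(ftype(fact) for fact in facts),
--                    key=lambda t: _FACT_TYPE_PRIORITY.get(t, 99))
--     return [line
--             for t in types
--             for line in ["[%s]" % t]
--                       + [f"- {fact.get('key', '?')}: {fact.get('value', '?')}"
--                          for fact in facts if ftype(fact) == t]]
-- ===== Notes on version B (the rewrite author's own statement) =====
-- stated objective: simpler
-- what changed: B drops A's bucket-dict accumulation entirely: it dedups the normalized type strings, sorts them by priority, and emits each group with one filter pass over the facts per type.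
import Mathlib
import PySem

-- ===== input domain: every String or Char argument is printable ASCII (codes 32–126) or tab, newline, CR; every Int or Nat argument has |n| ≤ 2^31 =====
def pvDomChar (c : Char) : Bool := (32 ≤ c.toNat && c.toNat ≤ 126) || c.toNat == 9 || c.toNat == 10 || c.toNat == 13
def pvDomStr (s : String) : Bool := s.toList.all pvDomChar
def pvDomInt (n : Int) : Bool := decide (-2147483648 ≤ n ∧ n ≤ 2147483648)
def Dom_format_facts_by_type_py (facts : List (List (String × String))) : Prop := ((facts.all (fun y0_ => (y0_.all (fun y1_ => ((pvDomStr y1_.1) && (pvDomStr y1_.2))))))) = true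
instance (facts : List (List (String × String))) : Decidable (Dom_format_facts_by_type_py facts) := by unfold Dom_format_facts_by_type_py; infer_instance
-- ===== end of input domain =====

-- B replaces A's bucket-dict accumulation by dedup-the-types + sort + one filter per type
-- (simpler decomposition, same output; no speed claim).

-- the module constant _FACT_TYPE_PRIORITY (shared by both programs)
def pvPrio : PySem.Dict String Int := PySem.Dict.mk
  [("workflow", 0), ("operation", 1), ("project", 2), ("infrastructure", 3),
   ("communication", 4), ("preference", 5), ("identity", 6), ("tooling", 7),
   ("schedule", 8), ("misc", 9)]

-- ===== PORT A =====
def format_facts_by_type_py (facts : List (List (String × String))) : List String :=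
  -- str(fact.get("type","misc")) : the values are str already, str() is the identity
  let buckets : PySem.Dict String (List String) :=
    facts.foldl (fun buckets fact =>
      let fact_type := (PySem.Dict.mk fact).getD "type" "misc"
      let key := (PySem.Dict.mk fact).getD "key" "?"
      let value := (PySem.Dict.mk fact).getD "value" "?"
      -- buckets.setdefault(fact_type, []).append(line): append, creating [] first
      buckets.modify fact_type [] (fun b => b ++ ["- " ++ key ++ ": " ++ value]))
      PySem.Dict.empty
  -- buckets[fact_type] always hits (fact_type ∈ buckets.keys), so getD is exact here
  (PySem.List.sorted buckets.keys (fun item => pvPrio.getD item 99) false).foldl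
    (fun lines fact_type =>
      (lines ++ ["[" ++ fact_type ++ "]"]) ++ buckets.getD fact_type []) []

-- ===== PORT B =====
-- Source B's helper ftype(fact)
def pvFtype (fact : List (String × String)) : String :=
  (PySem.Dict.mk fact).getD "type" "misc"

def format_facts_by_type_py_alt (facts : List (List (String × String))) : List String :=
  let types := PySem.List.sorted (PySem.List.dedup (facts.map pvFtype))
    (fun t => pvPrio.getD t 99) false
  types.flatMap (fun t =>
    ("[" ++ t ++ "]") ::
      ((facts.filter (fun fact => pvFtype fact == t)).map (fun fact =>
        "- " ++ (PySem.Dict.mk fact).getD "key" "?" ++ ": " ++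
          (PySem.Dict.mk fact).getD "value" "?")))

-- ===== PRECONDITION & SPEC =====
def Spec_format_facts_by_type_py (facts : List (List (String × String))) (out : List String) : Prop := out = format_facts_by_type_py_alt facts
instance (facts : List (List (String × String))) (out : List String) : Decidable (Spec_format_facts_by_type_py facts out) := by unfold Spec_format_facts_by_type_py; infer_instance

-- ===== CLAIM (what is proved, stated in full; the proofs are below) =====
def Claim_equal_format_facts_by_type_py : Prop := ∀ (facts : List (List (String × String))), Dom_format_facts_by_type_py facts → Spec_format_facts_by_type_py facts (format_facts_by_type_py facts)

-- ===== LEMMAS AND PROOFS =====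

-- the per-fact output line, proof-side abbreviation
def pvLine (fact : List (String × String)) : String :=
  "- " ++ (PySem.Dict.mk fact).getD "key" "?" ++ ": " ++
    (PySem.Dict.mk fact).getD "value" "?"

-- A's bucket dict, proof-side name
def pvBuckets (facts : List (List (String × String))) : PySem.Dict String (List String) :=
  facts.foldl (fun d fact => d.modify (pvFtype fact) [] (fun b => b ++ [pvLine fact]))
    PySem.Dict.empty

lemma pvBuckets_keys (facts : List (List (String × String))) :
    (pvBuckets facts).keys = PySem.List.dedup (facts.map pvFtype) := by
  unfold pvBuckets
  rw [PySem.Dict.keys_foldl_modify_key facts pvFtype [] (fun _ fact b => b ++ [pvLine fact])]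
  rfl

lemma pvBuckets_getD (facts : List (List (String × String))) (t : String) :
    (pvBuckets facts).getD t [] =
      (facts.filter (fun fact => pvFtype fact == t)).map pvLine := by
  unfold pvBuckets
  rw [show (fun (d : PySem.Dict String (List String)) fact =>
        d.modify (pvFtype fact) [] (fun b => b ++ [pvLine fact])) =
      (fun d fact =>
        (fun (d : PySem.Dict String (List String)) (p : String × String) =>
          d.modify p.1 [] (fun b => b ++ [p.2])) d (pvFtype fact, pvLine fact)) from rfl,
    ← List.foldl_map (f := fun fact => (pvFtype fact, pvLine fact))
      (g := fun (d : PySem.Dict String (List String)) (p : String × String) =>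
        d.modify p.1 [] (fun b => b ++ [p.2])),
    PySem.Dict.getD_foldl_modify_append]
  simp [List.filter_map, List.map_map, Function.comp_def]

lemma pv_foldl_lines (g : String → List String) (ts : List String) :
    ts.foldl (fun lines t => (lines ++ ["[" ++ t ++ "]"]) ++ g t) [] =
      ts.flatMap (fun t => ("[" ++ t ++ "]") :: g t) := by
  have h : (fun (lines : List String) t => (lines ++ ["[" ++ t ++ "]"]) ++ g t) =
      (fun lines t => lines ++ (("[" ++ t ++ "]") :: g t)) := by
    funext lines t; simp
  rw [h, PySem.List.foldl_append_eq_flatMap]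
  simp

-- ===== VERDICT (by name: the statement is the Claim_ definition above) =====
theorem format_facts_by_type_py_spec : Claim_equal_format_facts_by_type_py := by
  intro facts _
  unfold Spec_format_facts_by_type_py format_facts_by_type_py format_facts_by_type_py_alt
  dsimp only
  rw [show (facts.foldl (fun buckets fact =>
        buckets.modify ((PySem.Dict.mk fact).getD "type" "misc") []
          (fun b => b ++ ["- " ++ (PySem.Dict.mk fact).getD "key" "?" ++ ": " ++
            (PySem.Dict.mk fact).getD "value" "?"])) PySem.Dict.empty) =
      pvBuckets facts from rfl]
  rw [pvBuckets_keys, pv_foldl_lines]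
  refine List.flatMap_congr ?_
  intro t _
  rw [pvBuckets_getD]
  rfl
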